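-- pv_equiv track=rewrite | github.com/Ace1928/eidosian_forge | archive_forge/code/class_VariationModel.py | computeAxisRanges
-- ===== SOURCE A (Python) =====
-- def computeAxisRanges(locations):
--     axisRanges = {}
--     allAxes = {axis for loc in locations for axis in loc.keys()}
--     for loc in locations:
--         for axis in allAxes:
--             value = loc.get(axis, 0)
--             axisMin, axisMax = axisRanges.get(axis, (value, value))
--             axisRanges[axis] = (min(value, axisMin), max(value, axisMax))
--     return axisRanges
-- ===== SOURCE B (Python) =====
-- def computeAxisRanges(locations):
--     n = len(locations)
--     stats = {}
--     for loc in locations: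
--         for axis, v in loc.items():
--             if axis in stats:
--                 lo, hi, c = stats[axis]
--                 stats[axis] = (min(v, lo), max(v, hi), c + 1)
--             else:
--                 stats[axis] = (v, v, 1)
--     return {axis: ((lo, hi) if c == n else (min(lo, 0), max(hi, 0)))
--             for axis, (lo, hi, c) in stats.items()}
-- ===== Notes on version B (the rewrite author's own statement) =====
-- stated objective: faster
-- what changed: Instead of iterating every location against the full axis set (L*A dict lookups with default 0), B makes one pass over only the entries actually present, keeping (min, max, count) per axis in a single dict, and afterwards folds 0 into the range of every axis whose count is below the number of locations.
import Mathlib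
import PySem

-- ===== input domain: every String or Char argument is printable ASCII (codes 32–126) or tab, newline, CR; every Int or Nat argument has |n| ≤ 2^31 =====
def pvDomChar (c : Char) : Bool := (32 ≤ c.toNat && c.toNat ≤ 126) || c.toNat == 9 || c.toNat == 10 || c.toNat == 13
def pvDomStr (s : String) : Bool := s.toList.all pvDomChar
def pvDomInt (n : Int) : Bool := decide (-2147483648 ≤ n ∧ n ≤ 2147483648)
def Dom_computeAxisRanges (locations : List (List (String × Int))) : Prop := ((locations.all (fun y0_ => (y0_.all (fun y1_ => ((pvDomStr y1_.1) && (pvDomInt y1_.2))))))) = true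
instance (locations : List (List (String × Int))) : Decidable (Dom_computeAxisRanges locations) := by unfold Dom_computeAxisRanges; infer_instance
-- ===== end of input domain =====

-- B replaces A's locations × allAxes double loop by a single pass over the entries that are
-- actually present (per-axis min/max/count in one dict), folding 0 in afterwards for axes
-- missing from some location; same dict contents (dict outputs are compared ignoring order).

-- ===== PORT A =====
def computeAxisRanges (locations : List (List (String × Int))) : List (String × Int × Int) :=
  -- allAxes = {axis for loc in locations for axis in loc.keys()}
  let allAxes : PySem.Set String :=
    PySem.Set.ofList (locations.flatMap (fun loc => (PySem.Dict.mk loc).keys))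
  let axisRanges : PySem.Dict String (Int × Int) :=
    locations.foldl (fun d loc =>
      allAxes.foldl (fun d axis =>
        let value := (PySem.Dict.mk loc).getD axis 0
        let mm := d.getD axis (value, value)
        d.insert axis (min value mm.1, max value mm.2)) d)
      PySem.Dict.empty
  axisRanges.items

-- ===== PORT B =====
def computeAxisRanges_alt (locations : List (List (String × Int))) : List (String × Int × Int) :=
  let n : Int := locations.length
  let stats : PySem.Dict String (Int × Int × Int) :=
    locations.foldl (fun d loc =>
      loc.foldl (fun d p =>
        match d.get? p.1 with
        | some q => d.insert p.1 (min p.2 q.1, max p.2 q.2.1, q.2.2 + 1)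
        | none => d.insert p.1 (p.2, p.2, 1)) d)
      PySem.Dict.empty
  stats.items.map (fun q =>
    (q.1, if q.2.2.2 == n then (q.2.1, q.2.2.1) else (min q.2.1 0, max q.2.2.1 0)))

-- ===== PRECONDITION & SPEC =====
-- Pre_ excludes inner lists whose keys repeat: each inner list encodes a Python dict (whose
-- keys are necessarily distinct), so a duplicate-key list represents no Python input — dict
-- construction collapses the duplicate before A ever sees it.
def Pre_computeAxisRanges (locations : List (List (String × Int))) : Prop :=
  ∀ loc ∈ locations, (loc.map Prod.fst).Nodup
instance (locations : List (List (String × Int))) : Decidable (Pre_computeAxisRanges locations) := by unfold Pre_computeAxisRanges; infer_instance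

def pvWitness_computeAxisRanges : (List (List (String × Int))) :=
  [[("wght", 100), ("wdth", 50)], [("wght", -20)]]

def Spec_computeAxisRanges (locations : List (List (String × Int))) (out : List (String × Int × Int)) : Prop := out = computeAxisRanges_alt locations
instance (locations : List (List (String × Int))) (out : List (String × Int × Int)) : Decidable (Spec_computeAxisRanges locations out) := by unfold Spec_computeAxisRanges; infer_instance

-- ===== CLAIM (what is proved, stated in full; the proofs are below) =====
def Claim_equal_computeAxisRanges : Prop := ∀ (locations : List (List (String × Int))), Dom_computeAxisRanges locations → Pre_computeAxisRanges locations → Spec_computeAxisRanges locations (computeAxisRanges locations)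

-- ===== LEMMAS AND PROOFS =====

-- value of axis a in location loc, with Python's default 0 (loc.get(a, 0))
def pvGv (loc : List (String × Int)) (a : String) : Int := (PySem.Dict.mk loc).getD a 0
-- does loc carry axis a
def pvHas (loc : List (String × Int)) (a : String) : Bool := (PySem.Dict.mk loc).contains a
-- (min, max) of a value list, seeded from its head
def pvMM (vs : List Int) : Int × Int :=
  match vs with
  | [] => (0, 0)
  | v :: t => (t.foldl min v, t.foldl max v)
-- values of axis a over the locations that actually carry it
def pvVals (ls : List (List (String × Int))) (a : String) : List Int :=
  (ls.filter (fun loc => pvHas loc a)).map (fun loc => pvGv loc a)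
-- number of locations carrying axis a
def pvCnt (ls : List (List (String × Int))) (a : String) : Nat :=
  ls.countP (fun loc => pvHas loc a)
-- the distinct axes, in first-occurrence order
def pvK (ls : List (List (String × Int))) : List String :=
  PySem.Set.ofList (ls.flatMap (fun loc => loc.map Prod.fst))
-- per-axis payload of B's dict after processing ls
def pvStat (ls : List (List (String × Int))) (a : String) : Int × Int × Int :=
  ((pvMM (pvVals ls a)).1, (pvMM (pvVals ls a)).2, (pvCnt ls a : Int))

lemma pvK_mem (ls : List (List (String × Int))) (a : String) :
    a ∈ pvK ls ↔ ∃ loc ∈ ls, pvHas loc a = true := by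
  simp [pvK, PySem.Set.mem_ofList, List.mem_flatMap, pvHas, PySem.Dict.contains_iff_mem_keys]

lemma pvGv_of_not_has (loc : List (String × Int)) (a : String) (h : pvHas loc a = false) :
    pvGv loc a = 0 := by
  unfold pvHas at h
  exact PySem.Dict.getD_of_not_contains _ 0 h

lemma pvVals_cons_pos (loc : List (String × Int)) (t : List (List (String × Int))) (a : String)
    (h : pvHas loc a = true) : pvVals (loc :: t) a = pvGv loc a :: pvVals t a := by
  simp [pvVals, List.filter_cons, h]

lemma pvVals_cons_neg (loc : List (String × Int)) (t : List (List (String × Int))) (a : String)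
    (h : pvHas loc a = false) : pvVals (loc :: t) a = pvVals t a := by
  simp [pvVals, List.filter_cons, h]

lemma pvVals_ne_nil (ls : List (List (String × Int))) (a : String)
    (h : ∃ loc ∈ ls, pvHas loc a = true) : pvVals ls a ≠ [] := by
  obtain ⟨w, hw, hwhas⟩ := h
  simp only [pvVals, ne_eq, List.map_eq_nil_iff, List.filter_eq_nil_iff]
  intro hall
  exact absurd hwhas (by simpa using hall w hw)

lemma foldl_min_pull (l : List Int) : ∀ x y : Int, l.foldl min (min y x) = min y (l.foldl min x) := by
  induction l with
  | nil => intro x y; rfl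
  | cons w t ih => intro x y; simp only [List.foldl_cons]; rw [min_assoc, ih]

lemma foldl_max_pull (l : List Int) : ∀ x y : Int, l.foldl max (max y x) = max y (l.foldl max x) := by
  induction l with
  | nil => intro x y; rfl
  | cons w t ih => intro x y; simp only [List.foldl_cons]; rw [max_assoc, ih]

lemma pvZmin (a : String) : ∀ (ls : List (List (String × Int))) (x : Int),
    (ls.map (fun loc => pvGv loc a)).foldl min x =
      if ls.all (fun loc => pvHas loc a) then (pvVals ls a).foldl min x
      else min ((pvVals ls a).foldl min x) 0 := by
  intro ls
  induction ls with
  | nil => intro x; simp [pvVals]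
  | cons loc t ih =>
    intro x
    by_cases h : pvHas loc a = true
    · rw [pvVals_cons_pos loc t a h]
      simp only [List.map_cons, List.foldl_cons, List.all_cons, h, Bool.true_and]
      exact ih (min x (pvGv loc a))
    · have hb : pvHas loc a = false := by simpa using h
      rw [pvVals_cons_neg loc t a hb]
      simp only [List.map_cons, List.foldl_cons, List.all_cons, hb, Bool.false_and]
      rw [if_neg (by simp)]
      rw [pvGv_of_not_has loc a hb, min_comm x 0, foldl_min_pull, ih x]
      split_ifs with hall
      · generalize (pvVals t a).foldl min x = F; omega
      · generalize (pvVals t a).foldl min x = F; omega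

lemma pvZmax (a : String) : ∀ (ls : List (List (String × Int))) (x : Int),
    (ls.map (fun loc => pvGv loc a)).foldl max x =
      if ls.all (fun loc => pvHas loc a) then (pvVals ls a).foldl max x
      else max ((pvVals ls a).foldl max x) 0 := by
  intro ls
  induction ls with
  | nil => intro x; simp [pvVals]
  | cons loc t ih =>
    intro x
    by_cases h : pvHas loc a = true
    · rw [pvVals_cons_pos loc t a h]
      simp only [List.map_cons, List.foldl_cons, List.all_cons, h, Bool.true_and]
      exact ih (max x (pvGv loc a))
    · have hb : pvHas loc a = false := by simpa using h
      rw [pvVals_cons_neg loc t a hb]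
      simp only [List.map_cons, List.foldl_cons, List.all_cons, hb, Bool.false_and]
      rw [if_neg (by simp)]
      rw [pvGv_of_not_has loc a hb, max_comm x 0, foldl_max_pull, ih x]
      split_ifs with hall
      · generalize (pvVals t a).foldl max x = F; omega
      · generalize (pvVals t a).foldl max x = F; omega

-- pointwise: A's min/max over everything (default 0) vs B's min/max over present values patched with 0
lemma pv_pointwise (ls : List (List (String × Int))) (a : String)
    (h : ∃ loc ∈ ls, pvHas loc a = true) :
    pvMM (ls.map (fun loc => pvGv loc a)) =
      if pvCnt ls a = ls.length then pvMM (pvVals ls a)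
      else (min (pvMM (pvVals ls a)).1 0, max (pvMM (pvVals ls a)).2 0) := by
  obtain ⟨w, hw, hwhas⟩ := h
  cases ls with
  | nil => cases hw
  | cons l1 rest =>
    by_cases h1 : pvHas l1 a = true
    · have hC : (pvCnt (l1 :: rest) a = (l1 :: rest).length) ↔ (rest.all (fun loc => pvHas loc a) = true) := by
        rw [List.all_eq_true]
        rw [show (∀ loc ∈ rest, (fun loc => pvHas loc a) loc = true) ↔
              rest.countP (fun loc => pvHas loc a) = rest.length from List.countP_eq_length.symm]
        simp [pvCnt, List.countP_cons, h1]
      rw [pvVals_cons_pos l1 rest a h1]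
      simp only [List.map_cons, pvMM]
      rw [pvZmin a rest (pvGv l1 a), pvZmax a rest (pvGv l1 a)]
      by_cases hall : rest.all (fun loc => pvHas loc a) = true
      · rw [if_pos hall, if_pos hall, if_pos (hC.mpr hall)]
      · rw [if_neg hall, if_neg hall, if_neg (fun hc => hall (hC.mp hc))]
    · have hb : pvHas l1 a = false := by simpa using h1
      have hwr : w ∈ rest := by
        rcases List.mem_cons.mp hw with h' | h'
        · subst h'; rw [hwhas] at hb; cases hb
        · exact h'
      have hne : pvVals rest a ≠ [] := pvVals_ne_nil rest a ⟨w, hwr, hwhas⟩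
      have hCneg : ¬ (pvCnt (l1 :: rest) a = (l1 :: rest).length) := by
        have hle := List.countP_le_length (p := fun loc => pvHas loc a) (l := rest)
        simp [pvCnt, List.countP_cons, hb]
        omega
      rw [pvVals_cons_neg l1 rest a hb, if_neg hCneg]
      cases heq : pvVals rest a with
      | nil => exact absurd heq hne
      | cons hh tt =>
        simp only [List.map_cons]
        rw [pvGv_of_not_has l1 a hb]
        simp only [pvMM]
        rw [pvZmin a rest 0, pvZmax a rest 0, heq]
        simp only [List.foldl_cons]
        rw [foldl_min_pull tt hh 0, foldl_max_pull tt hh 0]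
        split_ifs with hall <;>
        · simp only [Prod.mk.injEq]
          refine ⟨?_, ?_⟩ <;>
          · generalize tt.foldl min hh = F
            generalize tt.foldl max hh = G
            omega

-- a pointwise overwrite that hits no key of l leaves l unchanged
lemma map_upd_eq_self {α : Type} (l : List (String × α)) (a : String) (v : String × α)
    (h : a ∉ l.map Prod.fst) :
    l.map (fun p => if p.1 == a then v else p) = l := by
  rw [List.map_congr_left (g := id), List.map_id]
  intro p hp
  have : p.1 ≠ a := fun he => h (he ▸ List.mem_map_of_mem hp)
  simp [this]

lemma map_fst_pair {β : Type} (f : String → β) (K : List String) :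
    (K.map (fun a => (a, f a))).map Prod.fst = K := by
  induction K with
  | nil => rfl
  | cons a K ih => simp [ih]

-- ===== A-side characterization =====

-- first pass of A's outer loop: all axes are fresh, each gets (v, v)
lemma A_first (loc : List (String × Int)) :
    ∀ (K : List String) (d : PySem.Dict String (Int × Int)), (d.keys ++ K).Nodup →
    (K.foldl (fun d axis =>
        d.insert axis (min (pvGv loc axis) (d.getD axis (pvGv loc axis, pvGv loc axis)).1,
                       max (pvGv loc axis) (d.getD axis (pvGv loc axis, pvGv loc axis)).2)) d).items
      = d.items ++ K.map (fun a => (a, (pvGv loc a, pvGv loc a))) := by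
  intro K
  induction K with
  | nil => intro d h; simp
  | cons a K ih =>
    intro d h
    have h0 := h
    rw [List.nodup_middle, List.nodup_cons] at h0
    have hmem : a ∉ d.keys := fun hk => h0.1 (List.mem_append_left _ hk)
    have hc : d.contains a = false := by
      simp [PySem.Dict.contains_eq_decide_mem_keys, hmem]
    simp only [List.foldl_cons]
    rw [PySem.Dict.getD_of_not_contains _ _ hc]
    have hrec := ih (d.insert a (min (pvGv loc a) (pvGv loc a, pvGv loc a).1,
                                 max (pvGv loc a) (pvGv loc a, pvGv loc a).2))
      (by
        rw [PySem.Dict.keys_insert_of_not_contains _ _ hc, List.append_assoc]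
        simpa using h)
    rw [hrec, PySem.Dict.items_insert_of_not_contains _ _ hc]
    simp [min_self, max_self]

-- later passes: every axis is already present and is updated in place
lemma A_inner (loc : List (String × Int)) (f : String → Int × Int) :
    ∀ (K : List String) (d : PySem.Dict String (Int × Int)) (pre : List (String × Int × Int)),
    d.keys.Nodup → d.items = pre ++ K.map (fun a => (a, f a)) →
    (K.foldl (fun d axis =>
        d.insert axis (min (pvGv loc axis) (d.getD axis (pvGv loc axis, pvGv loc axis)).1,
                       max (pvGv loc axis) (d.getD axis (pvGv loc axis, pvGv loc axis)).2)) d).items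
      = pre ++ K.map (fun a => (a, (min (pvGv loc a) (f a).1, max (pvGv loc a) (f a).2))) := by
  intro K
  induction K with
  | nil => intro d pre hnd hd; simpa using hd
  | cons a K ih =>
    intro d pre hnd hd
    have hkeys : d.keys = pre.map Prod.fst ++ a :: K := by
      show d.items.map Prod.fst = _
      rw [hd, List.map_append, map_fst_pair f (a :: K)]
    have hmemi : (a, f a) ∈ d.items := by rw [hd]; simp
    have hmemk : a ∈ d.keys := by rw [hkeys]; simp
    have hc : d.contains a = true := by
      simp [PySem.Dict.contains_eq_decide_mem_keys, hmemk]
    have hnd' := hnd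
    rw [hkeys, List.nodup_middle, List.nodup_cons] at hnd'
    have hapre : a ∉ pre.map Prod.fst := fun hx => hnd'.1 (List.mem_append_left _ hx)
    have haK : a ∉ K := fun hx => hnd'.1 (List.mem_append_right _ hx)
    simp only [List.foldl_cons]
    rw [PySem.Dict.getD_of_mem_items _ hmemi hnd]
    set v' : Int × Int := (min (pvGv loc a) (f a).1, max (pvGv loc a) (f a).2) with hv'
    have hitems' : (d.insert a v').items = (pre ++ [(a, v')]) ++ K.map (fun a' => (a', f a')) := by
      rw [PySem.Dict.items_insert_of_contains _ _ hc, hd]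
      simp only [List.map_append, List.map_cons]
      rw [map_upd_eq_self pre a (a, v') hapre]
      rw [map_upd_eq_self (K.map (fun a' => (a', f a'))) a (a, v') (by simpa [Function.comp] using haK)]
      simp
    have hnd2 : (d.insert a v').keys.Nodup := by
      have hk2 : (d.insert a v').keys = d.keys := by
        show (d.insert a v').items.map Prod.fst = d.items.map Prod.fst
        rw [hitems', hd]; simp [map_fst_pair]
      rw [hk2]; exact hnd
    rw [ih (d.insert a v') (pre ++ [(a, v')]) hnd2 hitems']
    simp [← hv']

lemma A_outer (K : List String) (hK : K.Nodup) :
    ∀ (ls : List (List (String × Int))) (d : PySem.Dict String (Int × Int)) (f : String → Int × Int),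
    d.items = K.map (fun a => (a, f a)) →
    (ls.foldl (fun d loc =>
        K.foldl (fun d axis =>
          d.insert axis (min (pvGv loc axis) (d.getD axis (pvGv loc axis, pvGv loc axis)).1,
                         max (pvGv loc axis) (d.getD axis (pvGv loc axis, pvGv loc axis)).2)) d) d).items
      = K.map (fun a => (a,
          ls.foldl (fun mm loc => (min (pvGv loc a) mm.1, max (pvGv loc a) mm.2)) (f a))) := by
  intro ls
  induction ls with
  | nil => intro d f hd; simpa using hd
  | cons loc ls ih =>
    intro d f hd
    have hnd : d.keys.Nodup := by
      have hk : d.keys = K := by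
        show d.items.map Prod.fst = K
        rw [hd, map_fst_pair f K]
      rw [hk]; exact hK
    simp only [List.foldl_cons]
    rw [ih _ (fun a => (min (pvGv loc a) (f a).1, max (pvGv loc a) (f a).2))
      (by simpa using A_inner loc f K d [] hnd (by simpa using hd))]

lemma pair_fold (a : String) :
    ∀ (ls : List (List (String × Int))) (p : Int × Int),
    ls.foldl (fun mm loc => (min (pvGv loc a) mm.1, max (pvGv loc a) mm.2)) p
      = ((ls.map (fun loc => pvGv loc a)).foldl min p.1, (ls.map (fun loc => pvGv loc a)).foldl max p.2) := by
  intro ls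
  induction ls with
  | nil => intro p; rfl
  | cons loc t ih =>
    intro p
    simp only [List.foldl_cons, List.map_cons]
    rw [ih]
    simp [min_comm, max_comm]

lemma A_char (ls : List (List (String × Int))) :
    computeAxisRanges ls = (pvK ls).map (fun a => (a, pvMM (ls.map (fun loc => pvGv loc a)))) := by
  show (ls.foldl (fun d loc =>
      (pvK ls).foldl (fun d axis =>
        d.insert axis (min (pvGv loc axis) (d.getD axis (pvGv loc axis, pvGv loc axis)).1,
                       max (pvGv loc axis) (d.getD axis (pvGv loc axis, pvGv loc axis)).2)) d)
      PySem.Dict.empty).items = _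
  cases ls with
  | nil => rfl
  | cons l0 rest =>
    have hK : (pvK (l0 :: rest)).Nodup := PySem.Set.nodup_ofList _
    simp only [List.foldl_cons]
    rw [A_outer (pvK (l0 :: rest)) hK rest _ (fun a => (pvGv l0 a, pvGv l0 a))
      (by
        have h0 := A_first l0 (pvK (l0 :: rest)) PySem.Dict.empty
          (by simpa [PySem.Dict.keys_empty] using hK)
        rw [h0]
        rw [show (PySem.Dict.empty : PySem.Dict String (Int × Int)).items = [] from rfl]
        simp)]
    refine List.map_congr_left (fun a _ => ?_)
    rw [pair_fold]
    simp only [List.map_cons, pvMM]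

-- ===== B-side characterization =====

lemma pvVals_append_pos (P : List (List (String × Int))) (loc : List (String × Int)) (a : String)
    (h : pvHas loc a = true) : pvVals (P ++ [loc]) a = pvVals P a ++ [pvGv loc a] := by
  simp [pvVals, List.filter_append, h]

lemma pvVals_append_neg (P : List (List (String × Int))) (loc : List (String × Int)) (a : String)
    (h : pvHas loc a = false) : pvVals (P ++ [loc]) a = pvVals P a := by
  simp [pvVals, List.filter_append, h]

lemma pvCnt_append_pos (P : List (List (String × Int))) (loc : List (String × Int)) (a : String)
    (h : pvHas loc a = true) : pvCnt (P ++ [loc]) a = pvCnt P a + 1 := by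
  simp [pvCnt, List.countP_append, h]

lemma pvCnt_append_neg (P : List (List (String × Int))) (loc : List (String × Int)) (a : String)
    (h : pvHas loc a = false) : pvCnt (P ++ [loc]) a = pvCnt P a := by
  simp [pvCnt, List.countP_append, h]

lemma pvMM_append (l : List Int) (w : Int) (h : l ≠ []) :
    pvMM (l ++ [w]) = (min w (pvMM l).1, max w (pvMM l).2) := by
  cases l with
  | nil => exact absurd rfl h
  | cons v t => simp [pvMM, List.foldl_append, min_comm, max_comm]

lemma pv_not_mem_K (P : List (List (String × Int))) (a : String) (h : a ∉ pvK P) :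
    pvVals P a = [] ∧ pvCnt P a = 0 := by
  have hall : ∀ loc ∈ P, ¬ pvHas loc a = true := by
    intro loc hl hh
    exact h ((pvK_mem P a).mpr ⟨loc, hl, hh⟩)
  constructor
  · simp only [pvVals, List.map_eq_nil_iff, List.filter_eq_nil_iff]
    exact hall
  · exact List.countP_eq_zero.mpr hall

lemma pvGv_mem (loc : List (String × Int)) (p : String × Int)
    (hn : (loc.map Prod.fst).Nodup) (hp : p ∈ loc) : pvGv loc p.1 = p.2 := by
  exact PySem.Dict.getD_of_mem_items _ (by exact hp) hn 0

lemma pvHas_mem (loc : List (String × Int)) (p : String × Int) (hp : p ∈ loc) :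
    pvHas loc p.1 = true := by
  unfold pvHas
  rw [PySem.Dict.contains_iff_mem_keys]
  exact List.mem_map_of_mem hp

lemma B_entry :
    ∀ (es : List (String × Int)) (d : PySem.Dict String (Int × Int × Int)),
    d.keys.Nodup → (es.map Prod.fst).Nodup →
    (es.foldl (fun d p =>
        match d.get? p.1 with
        | some q => d.insert p.1 (min p.2 q.1, max p.2 q.2.1, q.2.2 + 1)
        | none => d.insert p.1 (p.2, p.2, 1)) d).items
      = d.items.map (fun q =>
          match (PySem.Dict.mk es).get? q.1 with
          | some v => (q.1, (min v q.2.1, max v q.2.2.1, q.2.2.2 + 1))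
          | none => q)
        ++ (es.filter (fun p => !(d.contains p.1))).map (fun p => (p.1, (p.2, p.2, (1 : Int)))) := by
  intro es
  induction es with
  | nil =>
    intro d hnd hes
    have hnone : ∀ x : String, (PySem.Dict.mk ([] : List (String × Int))).get? x = none := fun x => rfl
    simp [hnone]
  | cons p es ih =>
    intro d hnd hes
    obtain ⟨a, v⟩ := p
    have hes2 : (a :: es.map Prod.fst).Nodup := by simpa using hes
    have haes : a ∉ es.map Prod.fst := (List.nodup_cons.mp hes2).1
    have hes' : (es.map Prod.fst).Nodup := (List.nodup_cons.mp hes2).2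
    have hmkes : (PySem.Dict.mk es).get? a = none := by
      rw [PySem.Dict.get?_eq_none_iff_not_mem_keys]
      simpa using haes
    have hqmem_ne : ∀ q : String × Int × Int × Int, q ∈ d.items → q.1 ≠ a →
        (match (PySem.Dict.mk es).get? q.1 with
          | some v => (q.1, (min v q.2.1, max v q.2.2.1, q.2.2.2 + 1))
          | none => q)
        = (match (PySem.Dict.mk ((a, v) :: es)).get? q.1 with
          | some v => (q.1, (min v q.2.1, max v q.2.2.1, q.2.2.2 + 1))
          | none => q) := by
      intro q _ hqa
      rw [PySem.Dict.get?_mk_cons, show (a == q.1) = false from beq_eq_false_iff_ne.mpr (Ne.symm hqa)]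
      simp
    cases hget : d.get? a with
    | some q0 =>
      have hc : d.contains a = true := by
        rw [PySem.Dict.contains_eq_isSome_get?, hget]; rfl
      have hkeys' : (d.insert a (min v q0.1, max v q0.2.1, q0.2.2 + 1)).keys = d.keys :=
        PySem.Dict.keys_insert_of_contains _ _ hc
      have hnd' : (d.insert a (min v q0.1, max v q0.2.1, q0.2.2 + 1)).keys.Nodup := by
        rw [hkeys']; exact hnd
      simp only [List.foldl_cons, hget]
      rw [ih _ hnd' hes']
      rw [PySem.Dict.items_insert_of_contains _ _ hc, List.map_map]
      congr 1
      · refine List.map_congr_left (fun q hq => ?_)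
        by_cases hqa : q.1 = a
        · have hq2 : d.get? q.1 = some q.2 := PySem.Dict.get?_of_mem_items _ hq hnd
          rw [hqa, hget] at hq2
          have hq20 : q.2 = q0 := (Option.some.inj hq2).symm
          have hbeq : (q.1 == a) = true := by simp [hqa]
          simp only [Function.comp, hbeq, if_pos]
          rw [hmkes, PySem.Dict.get?_mk_cons]
          have : (a == q.1) = true := by simp [hqa]
          rw [this]
          simp [hq20, hqa]
        · have hbeq : (q.1 == a) = false := by simp [hqa]
          simp only [Function.comp, hbeq, Bool.false_eq_true, if_neg, ite_false]
          exact hqmem_ne q hq hqa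
      · rw [List.filter_cons]
        simp only [hc, Bool.not_true, Bool.false_eq_true, if_neg, ite_false]
        have : es.filter (fun p => !((d.insert a (min v q0.1, max v q0.2.1, q0.2.2 + 1)).contains p.1))
            = es.filter (fun p => !(d.contains p.1)) := by
          refine List.filter_congr (fun p hp => ?_)
          have hpa : (p.1 == a) = false := by
            have : p.1 ≠ a := fun he => haes (he ▸ List.mem_map_of_mem hp)
            simp [this]
          rw [PySem.Dict.contains_insert]
          rw [hpa]
          simp
        rw [this]
    | none =>
      have hc : d.contains a = false := by
        rw [PySem.Dict.contains_eq_isSome_get?, hget]; rfl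
      have hamem : a ∉ d.keys := (PySem.Dict.get?_eq_none_iff_not_mem_keys _ _).mp hget
      have hkeys' : (d.insert a (v, v, 1)).keys = d.keys ++ [a] :=
        PySem.Dict.keys_insert_of_not_contains _ _ hc
      have hnd' : (d.insert a (v, v, 1)).keys.Nodup := by
        rw [hkeys', List.nodup_append]
        refine ⟨hnd, List.nodup_singleton a, ?_⟩
        intro x hx y hy
        simp at hy; subst hy
        exact fun he => hamem (he ▸ hx)
      simp only [List.foldl_cons, hget]
      rw [ih _ hnd' hes']
      rw [PySem.Dict.items_insert_of_not_contains _ _ hc, List.map_append]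
      have hsing : ([(a, (v, v, (1 : Int)))].map (fun q =>
          match (PySem.Dict.mk es).get? q.1 with
          | some w => (q.1, (min w q.2.1, max w q.2.2.1, q.2.2.2 + 1))
          | none => q)) = [(a, (v, v, (1 : Int)))] := by
        simp [hmkes]
      rw [hsing]
      have hmapeq : d.items.map (fun q =>
          match (PySem.Dict.mk es).get? q.1 with
          | some w => (q.1, (min w q.2.1, max w q.2.2.1, q.2.2.2 + 1))
          | none => q)
        = d.items.map (fun q =>
          match (PySem.Dict.mk ((a, v) :: es)).get? q.1 with
          | some w => (q.1, (min w q.2.1, max w q.2.2.1, q.2.2.2 + 1))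
          | none => q) := by
        refine List.map_congr_left (fun q hq => ?_)
        have hqa : q.1 ≠ a := by
          intro he
          exact hamem (he ▸ List.mem_map_of_mem hq)
        exact hqmem_ne q hq hqa
      rw [hmapeq]
      have hfil : es.filter (fun p => !((d.insert a (v, v, 1)).contains p.1))
          = es.filter (fun p => !(d.contains p.1)) := by
        refine List.filter_congr (fun p hp => ?_)
        have hpa : (p.1 == a) = false := by
          have : p.1 ≠ a := fun he => haes (he ▸ List.mem_map_of_mem hp)
          simp [this]
        rw [PySem.Dict.contains_insert]
        rw [hpa]
        simp
      rw [hfil, List.filter_cons]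
      simp only [hc, Bool.not_false, if_pos, List.map_cons]
      rw [List.append_assoc]
      rfl

lemma B_step (P : List (List (String × Int))) (loc : List (String × Int))
    (hnod : (loc.map Prod.fst).Nodup) (d : PySem.Dict String (Int × Int × Int))
    (hd : d.items = (pvK P).map (fun a => (a, pvStat P a))) :
    (loc.foldl (fun d p =>
        match d.get? p.1 with
        | some q => d.insert p.1 (min p.2 q.1, max p.2 q.2.1, q.2.2 + 1)
        | none => d.insert p.1 (p.2, p.2, 1)) d).items
      = (pvK (P ++ [loc])).map (fun a => (a, pvStat (P ++ [loc]) a)) := by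
  have hkeysd : d.keys = pvK P := by
    show d.items.map Prod.fst = _
    rw [hd, map_fst_pair]
  have hnd : d.keys.Nodup := by rw [hkeysd]; exact PySem.Set.nodup_ofList _
  rw [B_entry loc d hnd hnod, hd, List.map_map]
  have hKapp : pvK (P ++ [loc]) = pvK P ++ (loc.filter (fun p => !(d.contains p.1))).map Prod.fst := by
    unfold pvK
    rw [List.flatMap_append]
    simp only [List.flatMap_cons, List.flatMap_nil, List.append_nil]
    rw [PySem.Set.ofList_append, PySem.Set.update_eq_append_filter,
        PySem.Set.ofList_eq_self_of_nodup _ hnod]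
    congr 1
    rw [List.filter_map]
    refine congrArg (List.map Prod.fst) (List.filter_congr (fun p _ => ?_))
    simp [Function.comp, PySem.Set.contains_eq_listContains,
      PySem.Dict.contains_eq_decide_mem_keys, hkeysd, pvK]
  rw [hKapp, List.map_append]
  congr 1
  · refine List.map_congr_left (fun a haP => ?_)
    simp only [Function.comp]
    cases hga : (PySem.Dict.mk loc).get? a with
    | some v =>
      have hhas : pvHas loc a = true := by
        unfold pvHas
        rw [PySem.Dict.contains_eq_isSome_get?, hga]; rfl
      have hgv : pvGv loc a = v := by
        unfold pvGv
        rw [PySem.Dict.getD_eq_get?_getD, hga]; rfl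
      have hvne : pvVals P a ≠ [] := pvVals_ne_nil P a ((pvK_mem P a).mp haP)
      simp only [pvStat]
      rw [pvVals_append_pos P loc a hhas, pvCnt_append_pos P loc a hhas,
        pvMM_append _ _ hvne, hgv]
      simp [Int.add_comm]
    | none =>
      have hhas : pvHas loc a = false := by
        unfold pvHas
        rw [PySem.Dict.contains_eq_isSome_get?, hga]; rfl
      simp only [pvStat]
      rw [pvVals_append_neg P loc a hhas, pvCnt_append_neg P loc a hhas]
  · rw [List.map_map]
    refine List.map_congr_left (fun p hp => ?_)
    have hpmem : p ∈ loc := List.mem_of_mem_filter hp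
    have hfresh : d.contains p.1 = false := by
      have := List.of_mem_filter hp
      simpa using this
    have hnK : p.1 ∉ pvK P := by
      rw [PySem.Dict.contains_eq_decide_mem_keys, hkeysd] at hfresh
      simpa using hfresh
    obtain ⟨hv0, hc0⟩ := pv_not_mem_K P p.1 hnK
    have hhas : pvHas loc p.1 = true := pvHas_mem loc p hpmem
    simp only [Function.comp, pvStat]
    rw [pvVals_append_pos P loc p.1 hhas, pvCnt_append_pos P loc p.1 hhas, hv0, hc0,
      pvGv_mem loc p hnod hpmem]
    simp [pvMM]

lemma B_aux :
    ∀ (ls P : List (List (String × Int))) (d : PySem.Dict String (Int × Int × Int)),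
    (∀ loc ∈ ls, (loc.map Prod.fst).Nodup) →
    d.items = (pvK P).map (fun a => (a, pvStat P a)) →
    (ls.foldl (fun d loc =>
        loc.foldl (fun d p =>
          match d.get? p.1 with
          | some q => d.insert p.1 (min p.2 q.1, max p.2 q.2.1, q.2.2 + 1)
          | none => d.insert p.1 (p.2, p.2, 1)) d) d).items
      = (pvK (P ++ ls)).map (fun a => (a, pvStat (P ++ ls) a)) := by
  intro ls
  induction ls with
  | nil => intro P d _ hd; simpa using hd
  | cons loc t ih =>
    intro P d hns hd
    simp only [List.foldl_cons]
    have h1 := B_step P loc (hns loc List.mem_cons_self) d hd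
    have h2 := ih (P ++ [loc]) _ (fun l hl => hns l (List.mem_cons_of_mem _ hl)) h1
    rw [h2, List.append_assoc]
    rfl

lemma B_outer :
    ∀ (ls : List (List (String × Int))), (∀ loc ∈ ls, (loc.map Prod.fst).Nodup) →
    (ls.foldl (fun d loc =>
        loc.foldl (fun d p =>
          match d.get? p.1 with
          | some q => d.insert p.1 (min p.2 q.1, max p.2 q.2.1, q.2.2 + 1)
          | none => d.insert p.1 (p.2, p.2, 1)) d) (PySem.Dict.empty : PySem.Dict String (Int × Int × Int))).items
      = (pvK ls).map (fun a => (a, pvStat ls a)) := by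
  intro ls hns
  have h0 : (PySem.Dict.empty : PySem.Dict String (Int × Int × Int)).items
      = (pvK []).map (fun a => (a, pvStat [] a)) := rfl
  have := B_aux ls [] PySem.Dict.empty hns h0
  simpa using this

-- ===== VERDICT (by name: the statement is the Claim_ definition above) =====
theorem computeAxisRanges_spec : Claim_equal_computeAxisRanges := by
  intro ls hdom hpre
  unfold Spec_computeAxisRanges
  rw [A_char]
  show _ = ((ls.foldl (fun d loc =>
        loc.foldl (fun d p =>
          match d.get? p.1 with
          | some q => d.insert p.1 (min p.2 q.1, max p.2 q.2.1, q.2.2 + 1)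
          | none => d.insert p.1 (p.2, p.2, 1)) d) (PySem.Dict.empty : PySem.Dict String (Int × Int × Int))).items).map
      (fun q => (q.1, if q.2.2.2 == (ls.length : Int) then (q.2.1, q.2.2.1) else (min q.2.1 0, max q.2.2.1 0)))
  rw [B_outer ls hpre, List.map_map]
  refine List.map_congr_left (fun a ha => ?_)
  have hex : ∃ loc ∈ ls, pvHas loc a = true := (pvK_mem ls a).mp ha
  rw [pv_pointwise ls a hex]
  simp only [Function.comp, pvStat]
  by_cases hc : pvCnt ls a = ls.length
  · rw [if_pos hc, if_pos (by simpa using congrArg (Nat.cast : Nat → Int) hc)]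
  · rw [if_neg hc, if_neg (by simpa using fun h => hc (by exact_mod_cast h))]
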